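-- pv_equiv track=rewrite | github.com/OwczarekMaciej/LegalHackathon | app/routers/analize.py | _chunk_boundaries
-- ===== SOURCE A (Python) =====
-- def _chunk_boundaries(fragments: list[str]) -> list[tuple[int, int]]:
--     """Zwraca listę (start, end) w pełnym tekście dla każdego fragmentu."""
--     boundaries = []
--     pos = 0
--     for f in fragments:
--         start = pos
--         pos += len(f)
--         boundaries.append((start, pos))
--     return boundaries
-- ===== SOURCE B (Python) =====
-- from itertools import accumulate
--
-- def _chunk_boundaries(fragments: list[str]) -> list[tuple[int, int]]:
--     """Zwraca listę (start, end) w pełnym tekście dla każdego fragmentu."""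
--     ends = list(accumulate(len(f) for f in fragments))
--     starts = [0] + ends[:-1]
--     return list(zip(starts, ends))
-- ===== Notes on version B (the rewrite author's own statement) =====
-- stated objective: alternative
-- what changed: Replaces the single running-position loop that appends pairs with a prefix-sum (itertools.accumulate) producing all end offsets, then derives starts as 0-shifted ends and zips the two lists.
import Mathlib
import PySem

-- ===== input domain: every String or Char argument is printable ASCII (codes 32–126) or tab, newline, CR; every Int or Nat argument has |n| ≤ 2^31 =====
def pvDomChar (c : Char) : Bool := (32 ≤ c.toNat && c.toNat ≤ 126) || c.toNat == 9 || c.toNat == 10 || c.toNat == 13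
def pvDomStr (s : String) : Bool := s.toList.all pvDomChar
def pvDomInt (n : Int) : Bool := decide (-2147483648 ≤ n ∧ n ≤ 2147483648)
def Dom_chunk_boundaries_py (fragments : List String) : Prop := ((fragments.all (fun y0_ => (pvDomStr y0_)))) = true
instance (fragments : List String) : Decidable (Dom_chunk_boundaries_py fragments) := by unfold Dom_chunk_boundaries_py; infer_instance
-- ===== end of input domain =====

-- B replaces A's running-position append loop by a prefix-sum of the lengths
-- followed by a separate pairing (zip) pass; same O(n) cost, different decomposition.

-- ===== PORT A =====
-- boundaries = []; pos = 0; for f in fragments: start = pos; pos += len(f); boundaries.append((start, pos))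
def chunk_boundaries_py (fragments : List String) : List (Int × Int) :=
  (fragments.foldl
    (fun (st : List (Int × Int) × Int) f =>
      let start := st.2
      let pos := st.2 + (PySem.Str.len f : Int)
      (st.1 ++ [(start, pos)], pos))
    ([], 0)).1

-- ===== PORT B =====
-- itertools.accumulate on a list of ints, running total starting at acc
def pyAccumulate : List Int → Int → List Int
  | [], _ => []
  | x :: xs, acc => (acc + x) :: pyAccumulate xs (acc + x)

-- ends = list(accumulate(len(f) for f in fragments)); starts = [0] + ends[:-1]; return list(zip(starts, ends))
def chunk_boundaries_py_alt (fragments : List String) : List (Int × Int) :=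
  let ends := pyAccumulate (fragments.map (fun f => (PySem.Str.len f : Int))) 0
  let starts := 0 :: ends.dropLast
  starts.zip ends

-- ===== PRECONDITION & SPEC =====
def Spec_chunk_boundaries_py (fragments : List String) (out : List (Int × Int)) : Prop := out = chunk_boundaries_py_alt fragments
instance (fragments : List String) (out : List (Int × Int)) : Decidable (Spec_chunk_boundaries_py fragments out) := by unfold Spec_chunk_boundaries_py; infer_instance

-- ===== CLAIM (what is proved, stated in full; the proofs are below) =====
def Claim_equal_chunk_boundaries_py : Prop := ∀ (fragments : List String), Dom_chunk_boundaries_py fragments → Spec_chunk_boundaries_py fragments (chunk_boundaries_py fragments)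

-- ===== LEMMAS AND PROOFS =====

-- A's loop over a list of lengths, generalized over accumulator and running position,
-- equals prefix-sums paired with their shifted copy.
theorem chunk_key (ls : List Int) (bs : List (Int × Int)) (p : Int) :
    (ls.foldl (fun (st : List (Int × Int) × Int) x => (st.1 ++ [(st.2, st.2 + x)], st.2 + x)) (bs, p)).1
    = bs ++ ((p :: (pyAccumulate ls p).dropLast).zip (pyAccumulate ls p)) := by
  induction ls generalizing bs p with
  | nil => simp [pyAccumulate]
  | cons x ls ih =>
    simp only [List.foldl_cons, pyAccumulate]
    rw [ih]
    cases h : pyAccumulate ls (p + x) with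
    | nil => simp
    | cons a as => simp [List.append_assoc]

-- ===== VERDICT (by name: the statement is the Claim_ definition above) =====
theorem chunk_boundaries_py_spec : Claim_equal_chunk_boundaries_py := by
  intro fragments _
  unfold Spec_chunk_boundaries_py chunk_boundaries_py chunk_boundaries_py_alt
  rw [← List.foldl_map (f := fun f => (PySem.Str.len f : Int))
      (g := fun (st : List (Int × Int) × Int) x => (st.1 ++ [(st.2, st.2 + x)], st.2 + x))]
  simpa using chunk_key (fragments.map (fun f => (PySem.Str.len f : Int))) [] 0
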